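-- pv_equiv track=rewrite | github.com/JelixLi/Genetic-AntColonyAlgorithm | GeneticAlgorithm/tspTests.py | check
-- ===== SOURCE A (Python) =====
-- def check(nodes):
--     if nodes==None:
--         return True
--     for nn in nodes:
--         check_dict = {}
--         for n in nn:
--             if check_dict.get(n):
--                 return False
--             check_dict[n] = True
--     s = len(nodes[0])
--     for nn in nodes:
--         if not len(nn)==s:
--             return False
--     return True
-- ===== SOURCE B (Python) =====
-- def check(nodes):
--     if nodes is None:
--         return True
--     for nn in nodes:
--         s = sorted(nn)
--         if any(a == b for a, b in zip(s, s[1:])):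
--             return False
--     return len({len(nn) for nn in nodes}) == 1
-- ===== Notes on version B (the rewrite author's own statement) =====
-- stated objective: alternative
-- what changed: Duplicate detection switches from A's incremental dict insertion with an inner early-return scan to sort-then-adjacent-compare per row, and the length check from a compare-to-first loop to the cardinality of the set of row lengths.
-- crash fix: On nodes == [] A raises IndexError at nodes[0]; B returns False (no single common row length exists). — e.g. on check(some []): A raises IndexError, B returns false
import Mathlib
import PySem

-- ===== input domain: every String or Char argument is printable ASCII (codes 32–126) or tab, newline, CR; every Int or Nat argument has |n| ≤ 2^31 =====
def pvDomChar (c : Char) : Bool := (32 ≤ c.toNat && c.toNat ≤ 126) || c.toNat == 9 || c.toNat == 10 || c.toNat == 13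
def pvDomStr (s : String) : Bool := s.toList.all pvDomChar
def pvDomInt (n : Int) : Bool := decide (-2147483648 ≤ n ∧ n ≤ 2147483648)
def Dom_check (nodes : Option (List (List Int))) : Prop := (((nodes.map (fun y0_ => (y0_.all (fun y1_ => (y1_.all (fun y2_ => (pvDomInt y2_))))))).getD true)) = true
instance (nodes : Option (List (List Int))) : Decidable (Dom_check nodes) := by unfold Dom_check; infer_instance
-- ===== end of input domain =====

-- B detects a duplicate row element by sorting the row and scanning adjacent pairs
-- (instead of A's maintained dict with an inner early-return loop), and checks length
-- uniformity by the cardinality of the set of row lengths (objective: alternative).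

-- ===== PORT A =====
-- inner loop 'for n in nn: if check_dict.get(n): return False; check_dict[n] = True'
-- (returns true when a duplicate is hit, i.e. A would 'return False')
def checkDupRow (d : PySem.Dict Int Bool) : List Int → Bool
  | [] => false
  | n :: rest =>
      if (d.get? n).getD false then true
      else checkDupRow (d.insert n true) rest

-- second loop 'for nn in nodes: if not len(nn)==s: return False' then 'return True'
def checkLenLoop (s : Int) : List (List Int) → Bool
  | [] => true
  | nn :: rest => if ¬ ((nn.length : Int) == s) then false else checkLenLoop s rest

-- first loop over rows, then 's = len(nodes[0])' (nodes[0] raises IndexError on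
-- the empty list — excluded by Pre_check; the port returns false there, unclaimed)
def checkDupLoop (full : List (List Int)) : List (List Int) → Bool
  | [] =>
      match full with
      | [] => false
      | r0 :: _ => checkLenLoop (r0.length : Int) full
  | nn :: rest =>
      if checkDupRow PySem.Dict.empty nn then false
      else checkDupLoop full rest

def check (nodes : Option (List (List Int))) : Bool :=
  match nodes with
  | none => true
  | some rows => checkDupLoop rows rows

-- ===== PORT B =====
-- 's = sorted(nn); any(a == b for a, b in zip(s, s[1:]))' per row, early return False;
-- then 'len({len(nn) for nn in nodes}) == 1'
def check_alt (nodes : Option (List (List Int))) : Bool :=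
  match nodes with
  | none => true
  | some rows =>
      if rows.any (fun nn =>
          let s := PySem.List.sorted nn (fun x => x) false
          (s.zip s.tail).any (fun p => p.1 == p.2)) then false
      else (PySem.Set.ofList (rows.map (fun nn => (nn.length : Int)))).length == 1

-- ===== PRECONDITION & SPEC =====
-- Pre_check excludes only nodes = some []: there A raises IndexError at nodes[0].
def Pre_check (nodes : Option (List (List Int))) : Prop := nodes ≠ some []
instance (nodes : Option (List (List Int))) : Decidable (Pre_check nodes) := by unfold Pre_check; infer_instance

def pvWitness_check : Option (List (List Int)) := some [[1, 2], [3, 4]]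

-- On nodes == [] A raises IndexError at nodes[0]; B returns False (no single common row length exists).
def Raises_check (nodes : Option (List (List Int))) : Prop := nodes = some []
instance (nodes : Option (List (List Int))) : Decidable (Raises_check nodes) := by unfold Raises_check; infer_instance
def pvRaiseWitness_check : Option (List (List Int)) := some []
def pvRaiseWitnessOut_check : Bool := false

def Spec_check (nodes : Option (List (List Int))) (out : Bool) : Prop := out = check_alt nodes
instance (nodes : Option (List (List Int))) (out : Bool) : Decidable (Spec_check nodes out) := by unfold Spec_check; infer_instance

-- ===== CLAIM (what is proved, stated in full; the proofs are below) =====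
def Claim_equal_check : Prop := ∀ (nodes : Option (List (List Int))), Dom_check nodes → Pre_check nodes → Spec_check nodes (check nodes)
def Claim_raises_check : Prop := (∀ (nodes : Option (List (List Int))), Dom_check nodes → Raises_check nodes → ¬ Pre_check nodes) ∧ (Dom_check (pvRaiseWitness_check) ∧ Raises_check (pvRaiseWitness_check) ∧ check_alt (pvRaiseWitness_check) = pvRaiseWitnessOut_check)

-- ===== LEMMAS AND PROOFS =====

-- A's inner dict loop detects exactly: an element already a key of d, or a duplicate.
lemma checkDupRow_eq_false_iff (d : PySem.Dict Int Bool) (l : List Int) :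
    checkDupRow d l = false ↔ l.Nodup ∧ ∀ n ∈ l, (d.get? n).getD false = false := by
  induction l generalizing d with
  | nil => simp [checkDupRow]
  | cons n rest ih =>
      simp only [checkDupRow]
      by_cases h : (d.get? n).getD false = true
      · rw [if_pos h]
        constructor
        · intro hc; exact absurd hc (by simp)
        · rintro ⟨-, hall⟩
          have hn := hall n (List.mem_cons_self)
          simp [h] at hn
      · rw [if_neg h, ih]
        simp only [List.nodup_cons, List.mem_cons]
        constructor
        · rintro ⟨hnd, hall⟩
          refine ⟨⟨fun hmem => ?_, hnd⟩, ?_⟩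
          · have := hall n hmem
            simp at this
          · rintro m (rfl | hm)
            · simpa using h
            · have := hall m hm
              by_cases hmn : m = n
              · subst hmn; simpa using h
              · simpa [PySem.Dict.get?_insert, hmn] using this
        · rintro ⟨⟨hnmem, hnd⟩, hall⟩
          refine ⟨hnd, fun m hm => ?_⟩
          by_cases hmn : m = n
          · subst hmn; exact absurd hm hnmem
          · simpa [PySem.Dict.get?_insert, hmn] using hall m (Or.inr hm)

lemma checkDupRow_empty_iff (l : List Int) :
    checkDupRow PySem.Dict.empty l = false ↔ l.Nodup := by
  rw [checkDupRow_eq_false_iff]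
  simp [pysem, PySem.Dict.empty, PySem.Dict.get?]

-- adjacent-equal scan on a ≤-sorted list is exactly the (negated) Nodup test
lemma adj_false_iff (s : List Int) (hs : s.Pairwise (· ≤ ·)) :
    ((s.zip s.tail).any (fun p => p.1 == p.2) = false) ↔ s.Nodup := by
  induction s with
  | nil => simp
  | cons a s ih =>
      cases s with
      | nil => simp
      | cons b t =>
          have ha : ∀ x ∈ b :: t, a ≤ x := (List.pairwise_cons.1 hs).1
          have h' : (b :: t).Pairwise (· ≤ ·) := (List.pairwise_cons.1 hs).2
          have hb : ∀ x ∈ t, b ≤ x := (List.pairwise_cons.1 h').1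
          simp only [List.tail_cons, List.zip_cons_cons, List.any_cons, Bool.or_eq_false_iff,
            beq_eq_false_iff_ne, ne_eq]
          have iht := ih h'
          simp only [List.tail_cons] at iht
          rw [iht]
          constructor
          · rintro ⟨hab, hnd⟩
            refine List.nodup_cons.2 ⟨?_, hnd⟩
            intro hmem
            rcases List.mem_cons.1 hmem with h | hm
            · exact hab h
            · exact hab (le_antisymm (ha b List.mem_cons_self) (hb a hm))
          · intro hnd
            obtain ⟨hnm, hnd'⟩ := List.nodup_cons.1 hnd
            exact ⟨fun hab => hnm (hab ▸ List.mem_cons_self), hnd'⟩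

lemma sorted_adj_false_iff (nn : List Int) :
    ((fun s => (s.zip s.tail).any (fun p => p.1 == p.2))
        (PySem.List.sorted nn (fun x => x) false) = false) ↔ nn.Nodup := by
  have hp : (PySem.List.sorted nn (fun x => x) false).Pairwise (· ≤ ·) :=
    PySem.List.sorted_pairwise nn (fun x => x)
  have hperm : (PySem.List.sorted nn (fun x => x) false).Perm nn :=
    PySem.List.sorted_perm nn (fun x => x) false
  simpa using (adj_false_iff _ hp).trans hperm.nodup_iff

-- singleton set of lengths ↔ every length equals the first
lemma set_len_one_iff (c : Int) (L : List Int) :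
    ((PySem.Set.ofList (c :: L)).length = 1) ↔ ∀ x ∈ L, x = c := by
  constructor
  · intro h
    have hc : c ∈ PySem.Set.ofList (c :: L) := by
      rw [PySem.Set.mem_ofList]; exact List.mem_cons_self
    have hsing : PySem.Set.ofList (c :: L) = [c] := by
      match hS : PySem.Set.ofList (c :: L), h with
      | [y], _ =>
          rw [hS] at hc
          simp at hc
          rw [hc]
    intro x hx
    have : x ∈ PySem.Set.ofList (c :: L) := by
      rw [PySem.Set.mem_ofList]; exact List.mem_cons_of_mem _ hx
    rw [hsing] at this
    simpa using this
  · intro hall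
    have : PySem.Set.ofList (c :: L) = [c] := by
      have hnd := PySem.Set.nodup_ofList (c :: L)
      have hmem : ∀ x, x ∈ PySem.Set.ofList (c :: L) ↔ x = c := by
        intro x
        rw [PySem.Set.mem_ofList]
        constructor
        · intro hx
          rcases List.mem_cons.1 hx with h | h
          · exact h
          · exact hall x h
        · rintro rfl; exact List.mem_cons_self
      match hS : PySem.Set.ofList (c :: L) with
      | [] =>
          have : c ∈ PySem.Set.ofList (c :: L) := by
            rw [PySem.Set.mem_ofList]; exact List.mem_cons_self
          rw [hS] at this; simp at this
      | [y] =>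
          have : y ∈ PySem.Set.ofList (c :: L) := by rw [hS]; simp
          have := (hmem y).1 this
          rw [this]
      | y :: z :: r =>
          have hy : y = c := (hmem y).1 (by rw [hS]; simp)
          have hz : z = c := (hmem z).1 (by rw [hS]; simp)
          rw [hS] at hnd
          simp [hy, hz] at hnd
    rw [this]
    rfl

-- A's length loop equals 'all lengths == s'
lemma checkLenLoop_eq (s : Int) (rows : List (List Int)) :
    checkLenLoop s rows = rows.all (fun nn => (nn.length : Int) == s) := by
  induction rows with
  | nil => simp [checkLenLoop]
  | cons nn rest ih =>
      simp only [checkLenLoop, List.all_cons]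
      by_cases h : ((nn.length : Int) == s) = true
      · simp [h, ih]
      · simp [h]

-- A's outer dup loop equals B's 'any' over rows (then both fall into the length phase)
lemma checkDupLoop_eq (full rows : List (List Int)) :
    checkDupLoop full rows =
      if rows.any (fun nn =>
          let s := PySem.List.sorted nn (fun x => x) false
          (s.zip s.tail).any (fun p => p.1 == p.2)) then false
      else match full with
           | [] => false
           | r0 :: _ => checkLenLoop (r0.length : Int) full := by
  induction rows with
  | nil => simp [checkDupLoop]
  | cons nn rest ih =>
      simp only [checkDupLoop, List.any_cons]
      by_cases h : checkDupRow PySem.Dict.empty nn = false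
      · have hnd := (checkDupRow_empty_iff nn).1 h
        have hadj : ((PySem.List.sorted nn (fun x => x) false).zip
            (PySem.List.sorted nn (fun x => x) false).tail).any (fun p => p.1 == p.2) = false :=
          (sorted_adj_false_iff nn).2 hnd
        simp only [h, ih]
        simp [hadj]
      · have hdup : checkDupRow PySem.Dict.empty nn = true := by
          cases hb : checkDupRow PySem.Dict.empty nn
          · exact absurd hb h
          · rfl
        have hnnd : ¬ nn.Nodup := fun hc => h ((checkDupRow_empty_iff nn).2 hc)
        have hadj : ((PySem.List.sorted nn (fun x => x) false).zip
            (PySem.List.sorted nn (fun x => x) false).tail).any (fun p => p.1 == p.2) = true := by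
          cases hb : ((PySem.List.sorted nn (fun x => x) false).zip
              (PySem.List.sorted nn (fun x => x) false).tail).any (fun p => p.1 == p.2)
          · exact absurd ((sorted_adj_false_iff nn).1 hb) hnnd
          · rfl
        simp [hdup, hadj]

-- ===== VERDICT (by name: the statements are the Claim_ definitions above) =====
theorem check_spec : Claim_equal_check := by
  intro nodes _ hpre
  unfold Spec_check
  match nodes with
  | none => rfl
  | some rows =>
      have hne : rows ≠ [] := fun h => hpre (by rw [h])
      simp only [check, check_alt, checkDupLoop_eq]
      by_cases hany : rows.any (fun nn =>
          let s := PySem.List.sorted nn (fun x => x) false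
          (s.zip s.tail).any (fun p => p.1 == p.2)) = true
      · rw [hany]; rfl
      · simp only [Bool.not_eq_true] at hany
        rw [hany]
        match rows, hne with
        | r0 :: rest, _ =>
            show checkLenLoop ((r0.length : Int)) (r0 :: rest)
               = ((PySem.Set.ofList (((r0 :: rest).map (fun nn => (nn.length : Int))))).length == 1)
            rw [checkLenLoop_eq]
            simp only [List.map_cons]
            by_cases hall : ∀ x ∈ rest.map (fun nn => (nn.length : Int)), x = (r0.length : Int)
            · have h1 : (PySem.Set.ofList ((r0.length : Int) :: rest.map (fun nn => (nn.length : Int)))).length = 1 :=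
                (set_len_one_iff _ _).2 hall
              have hlist : ((r0 :: rest).all (fun nn => (nn.length : Int) == (r0.length : Int))) = true := by
                rw [List.all_eq_true]
                intro nn hnn
                rcases List.mem_cons.1 hnn with rfl | hm
                · simp
                · simpa using hall ((nn.length : Int)) (List.mem_map_of_mem hm)
              rw [hlist, h1]
              simp
            · have h1 : (PySem.Set.ofList ((r0.length : Int) :: rest.map (fun nn => (nn.length : Int)))).length ≠ 1 :=
                fun hc => hall ((set_len_one_iff _ _).1 hc)
              push_neg at hall
              obtain ⟨x, hx, hxne⟩ := hall
              obtain ⟨nn, hnn, rfl⟩ := List.mem_map.1 hx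
              have hlist : ((r0 :: rest).all (fun nn => (nn.length : Int) == (r0.length : Int))) = false := by
                simp only [List.all_eq_false]
                exact ⟨nn, List.mem_cons_of_mem _ hnn, by simpa using hxne⟩
              rw [hlist]
              simp [h1]

@[simp] theorem check_raises : Claim_raises_check := by
  unfold Claim_raises_check
  exact ⟨by intro nodes _ hr hp; exact hp hr, by decide⟩
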